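-- pv_equiv track=rewrite | github.com/780APM/LeetCodeProblems | daily13.py | maxScore
-- ===== SOURCE A (Python) =====
-- def maxScore(s):
--     """
--     :type s: str
--     :rtype: int
--     """
--     max_score = 0
--     for i in range(1, len(s)): # i is the index of the first character of the right substring
--         left = s[:i] # left substring
--         right = s[i:] # right substring
--         score = left.count('0') + right.count('1') # score of this split
--         max_score = max(max_score, score) # update max_score
--     return max_score # return max_score after all splits
-- ===== SOURCE B (Python) =====
-- def maxScore(s):
--     """
--     :type s: str
--     :rtype: int
--     """
--     total = s.count('1')
--     best = 0
--     zeros = 0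
--     ones = 0
--     for c in s[:-1]:  # each prefix end is a split point; last index is not a valid split
--         if c == '0':
--             zeros += 1
--         elif c == '1':
--             ones += 1
--         best = max(best, zeros + total - ones)
--     return best
-- ===== Notes on version B (the rewrite author's own statement) =====
-- stated objective: faster
-- what changed: Replaced A's per-split slicing and re-counting (a full count of '0'/'1' for each of the n-1 splits) by a single left-to-right pass that precomputes the total number of '1's and maintains running zero/one counters, scoring each split incrementally.
import Mathlib
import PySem

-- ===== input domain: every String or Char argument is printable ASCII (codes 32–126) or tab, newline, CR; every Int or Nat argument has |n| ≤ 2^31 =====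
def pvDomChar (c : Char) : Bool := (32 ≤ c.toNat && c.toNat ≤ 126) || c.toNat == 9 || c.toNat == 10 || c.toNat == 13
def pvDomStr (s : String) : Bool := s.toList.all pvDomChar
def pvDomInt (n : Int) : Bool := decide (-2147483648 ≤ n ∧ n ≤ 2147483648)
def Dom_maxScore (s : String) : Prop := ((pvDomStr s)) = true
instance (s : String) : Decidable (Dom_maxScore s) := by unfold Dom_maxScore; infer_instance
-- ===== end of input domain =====

-- B replaces A's quadratic re-count of every split by one pass with running zero/one counters (objective: faster, asymptotic).

-- ===== PORT A =====
def maxScore (s : String) : Int :=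
  (PySem.List.pyRange 1 (PySem.Str.len s) 1).foldl
    (fun max_score i =>
      let left := PySem.Str.slice s none (some i)          -- s[:i]
      let right := PySem.Str.slice s (some i) none         -- s[i:]
      let score : Int := (PySem.Str.count left "0" : Int) + (PySem.Str.count right "1" : Int)
      max max_score score) 0

-- ===== PORT B =====
def maxScore_alt (s : String) : Int :=
  let total : Int := (PySem.Str.count s "1" : Int)
  let res := (PySem.Str.slice s none (some (-1))).toList.foldl   -- for c in s[:-1]
    (fun (st : Int × Int × Int) c =>
      let zeros := if c = '0' then st.1 + 1 else st.1
      let ones := if c = '1' then st.2.1 + 1 else st.2.1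
      (zeros, ones, max st.2.2 (zeros + total - ones)))
    (0, 0, 0)
  res.2.2

-- ===== PRECONDITION & SPEC =====
def Spec_maxScore (s : String) (out : Int) : Prop := out = maxScore_alt s
instance (s : String) (out : Int) : Decidable (Spec_maxScore s out) := by unfold Spec_maxScore; infer_instance

-- ===== CLAIM (what is proved, stated in full; the proofs are below) =====
def Claim_equal_maxScore : Prop := ∀ (s : String), Dom_maxScore s → Spec_maxScore s (maxScore s)

-- ===== LEMMAS AND PROOFS =====

-- str.count with a single-character needle is List.count
theorem pv_count_go_single (c : Char) :
    ∀ (s : List Char) (fuel acc : Nat), s.length ≤ fuel →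
      PySem.Chars.count.go [c] fuel s acc = acc + s.count c := by
  intro s
  induction s with
  | nil => intro fuel acc _; cases fuel <;> simp [PySem.Chars.count.go]
  | cons h t ih =>
    intro fuel acc hle
    cases fuel with
    | zero => simp at hle
    | succ f =>
      have ht : t.length ≤ f := by simpa using hle
      by_cases hc : h = c
      · subst hc
        simp [PySem.Chars.count.go, List.isPrefixOf, ih f (acc + 1) ht]
        omega
      · have hp : ([c].isPrefixOf (h :: t)) = false := by
          simp [List.isPrefixOf]; exact fun he => (hc he.symm).elim
        simp [PySem.Chars.count.go, hp, ih f acc ht, hc]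

theorem pv_count_single (s : List Char) (c : Char) :
    PySem.Chars.count s [c] = s.count c := by
  simpa [PySem.Chars.count] using pv_count_go_single c s s.length 0 le_rfl

-- the B-side fold, processed prefix generalized
theorem pv_bfold (total : Int) :
    ∀ (xs p : List Char) (b : Int),
      (xs.foldl
        (fun (st : Int × Int × Int) c =>
          let zeros := if c = '0' then st.1 + 1 else st.1
          let ones := if c = '1' then st.2.1 + 1 else st.2.1
          (zeros, ones, max st.2.2 (zeros + total - ones)))
        ((p.count '0' : Int), (p.count '1' : Int), b)).2.2
      = (List.range xs.length).foldl
          (fun acc k => max acc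
            (((p ++ xs.take (k+1)).count '0' : Int) + total - ((p ++ xs.take (k+1)).count '1' : Int))) b := by
  intro xs
  induction xs with
  | nil => intro p b; simp
  | cons x t ih =>
    intro p b
    have hz : (if x = '0' then (p.count '0' : Int) + 1 else (p.count '0' : Int))
        = ((p ++ [x]).count '0' : Int) := by
      by_cases h : x = '0' <;> simp [h, List.count_append]
    have ho : (if x = '1' then (p.count '1' : Int) + 1 else (p.count '1' : Int))
        = ((p ++ [x]).count '1' : Int) := by
      by_cases h : x = '1' <;> simp [h, List.count_append]
    simp only [List.foldl_cons, hz, ho]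
    rw [ih (p ++ [x]) (max b (((p ++ [x]).count '0' : Int) + total - ((p ++ [x]).count '1' : Int)))]
    simp only [List.length_cons, List.range_succ_eq_map, List.foldl_cons, List.foldl_map,
      List.take_succ_cons, List.take_zero, Nat.succ_eq_add_one]
    congr 1
    funext acc k
    simp [List.append_assoc]

theorem pv_maxScore_eq (s : String) : maxScore s = maxScore_alt s := by
  have h0 : ("0" : String).toList = ['0'] := by decide
  have h1 : ("1" : String).toList = ['1'] := by decide
  unfold maxScore maxScore_alt
  rw [PySem.Str.slice_to_neg_one s, PySem.Str.count_eq s "1", h1, pv_count_single,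
    PySem.Str.len_eq]
  set l := s.toList with hl
  set dl := l.dropLast with hdl
  have hnum : ((l.length : Int) - 1).toNat = dl.length := by
    simp [hdl]
  rw [PySem.List.pyRange_one, List.foldl_map, hnum]
  refine Eq.trans (List.foldl_ext _
    (fun (acc : Int) (k : Nat) => max acc
      (((dl.take (k+1)).count '0' : Int) + (l.count '1' : Int) - ((dl.take (k+1)).count '1' : Int)))
    0 ?_) ?_
  · intro a k hk
    have hk' : k < dl.length := List.mem_range.mp hk
    have hlen : dl.length = l.length - 1 := by simp [hdl]
    have hnn : (0 : Int) ≤ 1 + k := by positivity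
    have htn : ((1 : Int) + k).toNat = k + 1 := by omega
    have hleft : (PySem.Str.slice s none (some ((1:Int) + k))).toList = l.take (k+1) := by
      simp [PySem.Str.slice, PySem.List.slice_to _ hnn, htn, hl]
    have hright : (PySem.Str.slice s (some ((1:Int) + k)) none).toList = l.drop (k+1) := by
      simp [PySem.Str.slice, PySem.List.slice_from _ hnn, htn, hl]
    have htake : l.take (k+1) = dl.take (k+1) := by
      rw [hdl, List.dropLast_eq_take, List.take_take]
      congr 1
      omega
    have hcnt : ((l.drop (k+1)).count '1' : Int)
        = (l.count '1' : Int) - ((l.take (k+1)).count '1' : Int) := by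
      have hc : (l.take (k+1)).count '1' + (l.drop (k+1)).count '1' = l.count '1' := by
        conv_rhs => rw [← List.take_append_drop (k+1) l]
        rw [List.count_append]
      omega
    dsimp only
    rw [PySem.Str.count_eq, PySem.Str.count_eq, hleft, hright, h0, h1,
      pv_count_single, pv_count_single, hcnt, htake]
    ring_nf
  · have hb := pv_bfold ((l.count '1' : Int)) dl [] 0
    simp only [List.count_nil, Nat.cast_zero, List.nil_append] at hb
    exact hb.symm

-- ===== VERDICT (by name: the statement is the Claim_ definition above) =====
theorem maxScore_spec : Claim_equal_maxScore := by
  intro s _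
  unfold Spec_maxScore
  exact pv_maxScore_eq s
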